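-- pv_equiv track=rewrite | github.com/mateozorzi/TDA | Resueltos/2024-c2-3/ej2.py | buscarOptimos
-- ===== SOURCE A (Python) =====
-- def buscarOptimos(cadena):
--     optimos = [[0 for _ in range(len(cadena))] for i in range(len(cadena))]
--     #i inicio de la cadena
--     #j fin de la cadena
--
--     #casos base
--     # i = j -> cadena de largo 1 tiene como optimo 0
--     for i in range(len(cadena)):
--         optimos[i][i] = 0
--
--     # j debe ser siempre mayor a i, sino no tiene sentido y el optimo es 0
--
--     for i in range(len(cadena),-1,-1):
--         for j in range(i+1, len(cadena)):
--             if i > j: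
--                 optimos[i][j] = 0
--             else:
--                 if j - i == 1:
--                     if cadena[i] == '(' and cadena[j] == ')':
--                         optimos[i][j] = 2
--                 else:
--                     #ec de recurrencia
--                     if cadena[j] == '(':
--                         optimos[i][j] = optimos[i][j-1]
--                     elif cadena[i] == ')':
--                         optimos[i][j] = optimos[i+1][j]
--                     else:
--                         optimos[i][j] = optimos[i+1][j-1] + 2
--
--     return optimos
-- ===== SOURCE B (Python) =====
-- def buscarOptimos(cadena):
--     # Top-down with memoisation instead of A's bottom-up table fill: each cell's
--     # value follows a single chain of dependencies (i,j) -> (i,j-1) | (i+1,j) | (i+1,j-1),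
--     # walked iteratively with an explicit stack (no recursion), caching every cell
--     # touched on the way back, so each cell is computed once: O(n^2) overall.
--     n = len(cadena)
--     cache = [[None] * n for _ in range(n)]
--     res = []
--     for i in range(n):
--         row = [0] * n
--         ci = cache[i]
--         for j in range(i + 1, n):
--             acc = ci[j]
--             if acc is None:
--                 ii = i
--                 jj = j
--                 path = []
--                 while jj - ii > 1 and cache[ii][jj] is None:
--                     if cadena[jj] == '(':
--                         path.append((ii, jj, 0))
--                         jj -= 1
--                     elif cadena[ii] == ')':
--                         path.append((ii, jj, 0))
--                         ii += 1
--                     else: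
--                         path.append((ii, jj, 2))
--                         ii += 1
--                         jj -= 1
--                 if ii >= jj:
--                     acc = 0
--                 else:
--                     acc = cache[ii][jj]
--                     if acc is None:
--                         acc = 2 if cadena[ii] == '(' and cadena[jj] == ')' else 0
--                         cache[ii][jj] = acc
--                 for pi, pj, inc in reversed(path):
--                     acc += inc
--                     cache[pi][pj] = acc
--             row[j] = acc
--         res.append(row)
--     return res
-- ===== Notes on version B (the rewrite author's own statement) =====
-- stated objective: alternative
-- what changed: Replaced A's bottom-up DP over a mutated n x n table (nested index loops filling rows upward) by a top-down memoised evaluation: each cell's value follows its single dependency chain (i,j)->(i,j-1)|(i+1,j)|(i+1,j-1), walked iteratively with an explicit stack and cached on the unwind, so every cell is still computed once (O(n^2)) but on demand instead of in a fixed sweep.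
import Mathlib
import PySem

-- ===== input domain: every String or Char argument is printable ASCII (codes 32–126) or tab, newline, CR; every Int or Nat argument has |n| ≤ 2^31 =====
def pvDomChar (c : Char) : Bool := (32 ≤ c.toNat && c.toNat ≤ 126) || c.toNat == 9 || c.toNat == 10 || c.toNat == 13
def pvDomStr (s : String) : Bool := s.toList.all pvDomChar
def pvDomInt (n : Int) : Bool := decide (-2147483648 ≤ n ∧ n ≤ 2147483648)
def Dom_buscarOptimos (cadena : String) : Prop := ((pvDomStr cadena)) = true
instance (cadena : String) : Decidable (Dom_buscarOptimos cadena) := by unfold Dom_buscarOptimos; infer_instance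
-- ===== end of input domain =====

-- B replaces A's bottom-up table fill by a top-down memoised computation: each cell's value
-- follows a single dependency chain, walked iteratively with an explicit stack and cached on
-- the way back (same values, a genuinely different evaluation strategy of the same cost class).

-- ===== PORT A =====
-- optimos[i][j] = v  /  optimos[i][j]: in A every index used is provably nonnegative and in
-- range, so Nat-indexed set/getD is exact here.
def pvSet2 (m : List (List Int)) (i j : Int) (v : Int) : List (List Int) :=
  m.set i.toNat ((m.getD i.toNat []).set j.toNat v)

def pvGet2 (m : List (List Int)) (i j : Int) : Int :=
  (m.getD i.toNat []).getD j.toNat 0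

def buscarOptimos (cadena : String) : List (List Int) :=
  let cs := cadena.toList
  let n : Int := cs.length
  let optimos0 := (PySem.List.pyRange 0 n 1).map (fun _ => (PySem.List.pyRange 0 n 1).map (fun _ => (0 : Int)))
  -- casos base: optimos[i][i] = 0
  let optimos1 := (PySem.List.pyRange 0 n 1).foldl (fun m i => pvSet2 m i i 0) optimos0
  (PySem.List.pyRange n (-1) (-1)).foldl (fun m i =>
    (PySem.List.pyRange (i + 1) n 1).foldl (fun m j =>
      if i > j then pvSet2 m i j 0
      else if j - i = 1 then
        (if PySem.List.pyGetD cs i ' ' = '(' ∧ PySem.List.pyGetD cs j ' ' = ')' then pvSet2 m i j 2 else m)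
      else
        if PySem.List.pyGetD cs j ' ' = '(' then pvSet2 m i j (pvGet2 m i (j - 1))
        else if PySem.List.pyGetD cs i ' ' = ')' then pvSet2 m i j (pvGet2 m (i + 1) j)
        else pvSet2 m i j (pvGet2 m (i + 1) (j - 1) + 2)) m) optimos1

-- ===== PORT B =====
-- cache[i][j]  /  cache[i][j] = v  (indices always in range in Source B; set/getD exact there)
def pvGetC (c : List (List (Option Int))) (i j : Nat) : Option Int :=
  (c.getD i []).getD j none

def pvSetC (c : List (List (Option Int))) (i j : Nat) (v : Int) : List (List (Option Int)) :=
  c.set i ((c.getD i []).set j (some v))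

-- the while-loop of Source B: walk the dependency chain, collecting (ii, jj, inc) frames
def pvWalk (cs : List Char) (cache : List (List (Option Int))) (i j : Nat)
    (path : List (Nat × Nat × Int)) : Nat × Nat × List (Nat × Nat × Int) :=
  if j - i > 1 ∧ pvGetC cache i j = none then
    if cs.getD j ' ' = '(' then pvWalk cs cache i (j - 1) (path ++ [(i, j, 0)])
    else if cs.getD i ' ' = ')' then pvWalk cs cache (i + 1) j (path ++ [(i, j, 0)])
    else pvWalk cs cache (i + 1) (j - 1) (path ++ [(i, j, 2)])
  else (i, j, path)
termination_by j - i
decreasing_by all_goals omega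

-- base value at the walk's stop cell (cache unchanged by the walk itself)
def pvBase (cs : List Char) (cache : List (List (Option Int))) (ii jj : Nat) :
    Int × List (List (Option Int)) :=
  if ii ≥ jj then ((0 : Int), cache)
  else
    match pvGetC cache ii jj with
    | some v => (v, cache)
    | none =>
      let acc : Int := if cs.getD ii ' ' = '(' ∧ cs.getD jj ' ' = ')' then 2 else 0
      (acc, pvSetC cache ii jj acc)

-- one unwind step: add the frame's increment and cache the cell's value
def pvStep (st : Int × List (List (Option Int))) (fr : Nat × Nat × Int) :
    Int × List (List (Option Int)) :=
  (st.1 + fr.2.2, pvSetC st.2 fr.1 fr.2.1 (st.1 + fr.2.2))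

-- one cell: walk, take the base value at the stop cell, unwind the stack caching values
def pvCell (cs : List Char) (cache : List (List (Option Int))) (i j : Nat) :
    Int × List (List (Option Int)) :=
  match pvWalk cs cache i j [] with
  | (ii, jj, path) => path.reverse.foldl pvStep (pvBase cs cache ii jj)

def buscarOptimos_alt (cadena : String) : List (List Int) :=
  let cs := cadena.toList
  let n := cs.length
  let cache0 : List (List (Option Int)) := (List.range n).map (fun _ => List.replicate n none)
  let (res, _) := (List.range n).foldl
    (fun (st : List (List Int) × List (List (Option Int))) i =>
      let (row, cache) := (List.range' (i + 1) (n - (i + 1))).foldl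
        (fun (st2 : List Int × List (List (Option Int))) j =>
          match pvGetC st2.2 i j with
          | some v => (st2.1.set j v, st2.2)
          | none =>
            let (acc, cache) := pvCell cs st2.2 i j
            (st2.1.set j acc, cache))
        (List.replicate n (0 : Int), st.2)
      (st.1 ++ [row], cache))
    ([], cache0)
  res

-- ===== PRECONDITION & SPEC =====
def Spec_buscarOptimos (cadena : String) (out : List (List Int)) : Prop := out = buscarOptimos_alt cadena
instance (cadena : String) (out : List (List Int)) : Decidable (Spec_buscarOptimos cadena out) := by unfold Spec_buscarOptimos; infer_instance

-- ===== CLAIM (what is proved, stated in full; the proofs are below) =====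
def Claim_equal_buscarOptimos : Prop := ∀ (cadena : String), Dom_buscarOptimos cadena → Spec_buscarOptimos cadena (buscarOptimos cadena)

-- ===== LEMMAS AND PROOFS =====

-- The common specification value of cell (i, j): the single-chain recurrence both programs
-- realise (A bottom-up, B by memoised chain walking).
def pvG (cs : List Char) (i j : Nat) : Int :=
  if i ≥ j then 0
  else if j - i = 1 then (if cs.getD i ' ' = '(' ∧ cs.getD j ' ' = ')' then 2 else 0)
  else if cs.getD j ' ' = '(' then pvG cs i (j - 1)
  else if cs.getD i ' ' = ')' then pvG cs (i + 1) j
  else pvG cs (i + 1) (j - 1) + 2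
termination_by j - i
decreasing_by all_goals omega

-- Proof-only matrix descriptions.
def pvRow (cs : List Char) (i : Nat) : List Int :=
  (List.range cs.length).map (fun j => pvG cs i j)
def pvRowTo (cs : List Char) (i j : Nat) : List Int :=
  (List.range cs.length).map (fun c => if c ≤ j then pvG cs i c else 0)

-- State of A's table while the inner loop for row i has filled columns ≤ j.
def pvS (cs : List Char) (i j : Nat) : List (List Int) :=
  (List.range cs.length).map (fun r =>
    if r < i then List.replicate cs.length 0 else if r = i then pvRowTo cs i j else pvRow cs r)

-- State of A's table after the outer loop has processed all rows ≥ k.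
def pvM (cs : List Char) (k : Nat) : List (List Int) :=
  (List.range cs.length).map (fun r => if r < k then List.replicate cs.length 0 else pvRow cs r)

theorem pvG_zero (cs : List Char) (i j : Nat) (h : j ≤ i) : pvG cs i j = 0 := by
  rw [pvG]; simp [h]

theorem pvM_top (cs : List Char) (k : Nat) (hk : cs.length ≤ k) :
    pvM cs k = List.replicate cs.length (List.replicate cs.length 0) := by
  unfold pvM
  apply List.ext_getElem (by simp)
  intro r h1 h2
  simp only [List.getElem_map, List.getElem_range, List.getElem_replicate] at *
  rw [if_pos (by simp at h1; omega)]

theorem set_zero_fix (n : Nat) (i : Int) :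
    pvSet2 (List.replicate n (List.replicate n 0)) i i 0 = List.replicate n (List.replicate n 0) := by
  unfold pvSet2
  by_cases h : i.toNat < n
  · rw [List.getD_eq_getElem?_getD, List.getElem?_replicate, if_pos h]
    simp [List.set_replicate_self]
  · rw [List.getD_eq_getElem?_getD, List.getElem?_replicate, if_neg h]
    simp
    exact List.set_eq_of_length_le (by simp; omega)

theorem foldl_fix (n : Nat) (l : List Int) :
    l.foldl (fun m i => pvSet2 m i i 0) (List.replicate n (List.replicate n 0)) = List.replicate n (List.replicate n 0) := by
  induction l with
  | nil => rfl
  | cons x xs ih => rw [List.foldl_cons, set_zero_fix, ih]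

theorem zeros_eq (n : Nat) :
    (PySem.List.pyRange 0 (n : Int) 1).map (fun _ => (PySem.List.pyRange 0 (n : Int) 1).map (fun _ => (0 : Int)))
    = List.replicate n (List.replicate n 0) := by
  rw [PySem.List.pyRange_zero_nat]
  rw [show ((fun (_ : Int) => (0:Int)) = Function.const Int 0) from rfl, List.map_const]
  simp only [List.length_map, List.length_range]
  rw [show ((fun (_ : Int) => List.replicate n (0:Int)) = Function.const Int (List.replicate n (0:Int))) from rfl, List.map_const]
  simp

theorem init_eq (cs : List Char) :
    (PySem.List.pyRange 0 (cs.length : Int) 1).foldl (fun m i => pvSet2 m i i 0)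
      ((PySem.List.pyRange 0 (cs.length : Int) 1).map
        (fun _ => (PySem.List.pyRange 0 (cs.length : Int) 1).map (fun _ => (0 : Int))))
    = pvM cs cs.length := by
  rw [zeros_eq, foldl_fix, pvM_top cs cs.length le_rfl]

theorem read_row_i (cs : List Char) (i j c : Nat) (hc : c ≤ j) (hi : i < cs.length) (hcn : c < cs.length) :
    pvGet2 (pvS cs i j) (i : Int) (c : Int) = pvG cs i c := by
  unfold pvGet2 pvS pvRowTo
  simp only [Int.toNat_natCast]
  rw [PySem.List.getD_map_range _ _ _ _ hi]
  rw [if_neg (by omega), if_pos rfl]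
  rw [PySem.List.getD_map_range _ _ _ _ hcn]
  rw [if_pos hc]

theorem read_row_below (cs : List Char) (i j r c : Nat) (hr : i < r) (hrn : r < cs.length) (hcn : c < cs.length) :
    pvGet2 (pvS cs i j) (r : Int) (c : Int) = pvG cs r c := by
  unfold pvGet2 pvS pvRow
  simp only [Int.toNat_natCast]
  rw [PySem.List.getD_map_range _ _ _ _ hrn]
  rw [if_neg (by omega), if_neg (by omega)]
  rw [PySem.List.getD_map_range _ _ _ _ hcn]

theorem rowTo_set (cs : List Char) (i j : Nat) :
    (pvRowTo cs i j).set (j + 1) (pvG cs i (j + 1)) = pvRowTo cs i (j + 1) := by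
  unfold pvRowTo
  apply List.ext_getElem (by simp)
  intro c hc1 hc2
  simp only [List.length_set, List.length_map, List.length_range] at hc1
  rw [List.getElem_set]
  by_cases hcj : j + 1 = c
  · rw [if_pos hcj]; subst hcj; simp only [List.getElem_map, List.getElem_range, if_pos (le_refl (j+1))]
  · rw [if_neg hcj]
    simp only [List.getElem_map, List.getElem_range]
    by_cases h : c ≤ j
    · rw [if_pos h, if_pos (by omega)]
    · rw [if_neg h, if_neg (by omega)]

theorem write_step (cs : List Char) (i j : Nat) (hi : i < cs.length) :
    pvSet2 (pvS cs i j) (i : Int) ((j : Int) + 1) (pvG cs i (j + 1)) = pvS cs i (j + 1) := by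
  unfold pvSet2 pvS
  rw [show ((j : Int) + 1) = ((j + 1 : Nat) : Int) by omega]
  simp only [Int.toNat_natCast]
  rw [PySem.List.getD_map_range _ _ _ _ hi, if_neg (by omega), if_pos rfl]
  apply List.ext_getElem (by simp)
  intro r h1 h2
  simp only [List.length_set, List.length_map, List.length_range] at h1
  rw [List.getElem_set]
  by_cases hri : i = r
  · rw [if_pos hri]; subst hri
    simp only [List.getElem_map, List.getElem_range, if_neg (lt_irrefl i)]
    exact rowTo_set cs i j
  · rw [if_neg hri]
    have hri' : ¬ r = i := fun h => hri h.symm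
    simp only [List.getElem_map, List.getElem_range]
    simp [hri']

theorem no_write_step (cs : List Char) (i j : Nat) (h0 : pvG cs i (j + 1) = 0) :
    pvS cs i (j + 1) = pvS cs i j := by
  unfold pvS
  apply List.ext_getElem (by simp)
  intro r h1 h2
  simp only [List.getElem_map, List.getElem_range]
  by_cases hri : r = i
  · subst hri
    rw [if_neg (lt_irrefl r), if_pos rfl, if_neg (lt_irrefl r), if_pos rfl]
    unfold pvRowTo
    apply List.ext_getElem (by simp)
    intro c hc1 hc2
    simp only [List.getElem_map, List.getElem_range]
    by_cases hcj : c = j + 1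
    · subst hcj; rw [if_pos (le_refl _), if_neg (by omega), h0]
    · by_cases h : c ≤ j
      · rw [if_pos (by omega), if_pos h]
      · rw [if_neg (by omega), if_neg h]
  · simp [hri]

theorem pvG_succ_eq (cs : List Char) (i : Nat) : pvG cs i (i + 1) =
    (if cs.getD i ' ' = '(' ∧ cs.getD (i + 1) ' ' = ')' then 2 else 0) := by
  rw [pvG]; simp

theorem inner_step (cs : List Char) (i j : Nat) (hij : i ≤ j) (hj : j + 1 < cs.length) :
    (fun (m : List (List Int)) (jj : Int) =>
      if (i : Int) > jj then pvSet2 m i jj 0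
      else if jj - i = 1 then
        (if PySem.List.pyGetD cs i ' ' = '(' ∧ PySem.List.pyGetD cs jj ' ' = ')' then pvSet2 m i jj 2 else m)
      else
        if PySem.List.pyGetD cs jj ' ' = '(' then pvSet2 m i jj (pvGet2 m i (jj - 1))
        else if PySem.List.pyGetD cs i ' ' = ')' then pvSet2 m i jj (pvGet2 m (i + 1) jj)
        else pvSet2 m i jj (pvGet2 m (i + 1) (jj - 1) + 2))
      (pvS cs i j) ((j : Int) + 1)
    = pvS cs i (j + 1) := by
  simp only []
  rw [if_neg (by omega)]
  have hcast1 : ((j : Int) + 1) = ((j + 1 : Nat) : Int) := by omega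
  have hcast2 : ((j : Int) + 1 - 1) = ((j : Nat) : Int) := by omega
  by_cases hji : j = i
  · subst hji
    rw [if_pos (by omega)]
    rw [hcast1, PySem.List.pyGetD_natCast, PySem.List.pyGetD_natCast]
    by_cases hc : cs.getD j ' ' = '(' ∧ cs.getD (j + 1) ' ' = ')'
    · rw [if_pos hc]
      have h2 : pvG cs j (j + 1) = 2 := by rw [pvG_succ_eq, if_pos hc]
      rw [show ((j + 1 : Nat) : Int) = ((j : Int) + 1) by omega, ← h2]
      exact write_step cs j j (by omega)
    · rw [if_neg hc]
      have h0 : pvG cs j (j + 1) = 0 := by rw [pvG_succ_eq, if_neg hc]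
      exact (no_write_step cs j j h0).symm
  · -- i < j, so j + 1 - i ≥ 2
    rw [if_neg (by omega)]
    rw [hcast1, PySem.List.pyGetD_natCast, PySem.List.pyGetD_natCast]
    have hG : pvG cs i (j + 1) =
        (if cs.getD (j + 1) ' ' = '(' then pvG cs i j
         else if cs.getD i ' ' = ')' then pvG cs (i + 1) (j + 1)
         else pvG cs (i + 1) j + 2) := by
      rw [pvG]
      rw [if_neg (by omega), if_neg (by omega)]
      simp
    by_cases hc1 : cs.getD (j + 1) ' ' = '('
    · rw [if_pos hc1]
      rw [show ((j + 1 : Nat) : Int) - 1 = ((j : Nat) : Int) by omega]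
      rw [read_row_i cs i j j (le_refl j) (by omega) (by omega)]
      rw [show ((j + 1 : Nat) : Int) = ((j : Int) + 1) by omega]
      rw [show pvG cs i j = pvG cs i (j + 1) by rw [hG, if_pos hc1]]
      exact write_step cs i j (by omega)
    · rw [if_neg hc1]
      by_cases hc2 : cs.getD i ' ' = ')'
      · rw [if_pos hc2]
        rw [show ((i : Int) + 1) = ((i + 1 : Nat) : Int) by omega]
        rw [read_row_below cs i j (i + 1) (j + 1) (by omega) (by omega) (by omega)]
        rw [show ((j + 1 : Nat) : Int) = ((j : Int) + 1) by omega]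
        rw [show pvG cs (i + 1) (j + 1) = pvG cs i (j + 1) by rw [hG, if_neg hc1, if_pos hc2]]
        exact write_step cs i j (by omega)
      · rw [if_neg hc2]
        rw [show ((i : Int) + 1) = ((i + 1 : Nat) : Int) by omega]
        rw [show ((j + 1 : Nat) : Int) - 1 = ((j : Nat) : Int) by omega]
        rw [read_row_below cs i j (i + 1) j (by omega) (by omega) (by omega)]
        rw [show ((j + 1 : Nat) : Int) = ((j : Int) + 1) by omega]
        rw [show pvG cs (i + 1) j + 2 = pvG cs i (j + 1) by rw [hG, if_neg hc1, if_neg hc2]]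
        exact write_step cs i j (by omega)

theorem inner_loop (cs : List Char) (i : Nat) :
    ∀ d j, i ≤ j → j < cs.length → cs.length - 1 - j = d →
      (PySem.List.pyRange ((j : Int) + 1) (cs.length : Int) 1).foldl
        (fun m jj =>
          if (i : Int) > jj then pvSet2 m i jj 0
          else if jj - i = 1 then
            (if PySem.List.pyGetD cs i ' ' = '(' ∧ PySem.List.pyGetD cs jj ' ' = ')' then pvSet2 m i jj 2 else m)
          else
            if PySem.List.pyGetD cs jj ' ' = '(' then pvSet2 m i jj (pvGet2 m i (jj - 1))
            else if PySem.List.pyGetD cs i ' ' = ')' then pvSet2 m i jj (pvGet2 m (i + 1) jj)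
            else pvSet2 m i jj (pvGet2 m (i + 1) (jj - 1) + 2))
        (pvS cs i j)
      = pvS cs i (cs.length - 1) := by
  intro d
  induction d with
  | zero =>
    intro j hij hjn hd
    rw [PySem.List.pyRange_one_eq_nil (by omega), List.foldl_nil]
    rw [show j = cs.length - 1 by omega]
  | succ k ih =>
    intro j hij hjn hd
    rw [PySem.List.pyRange_one_cons (by omega), List.foldl_cons]
    have hstep := inner_step cs i j hij (by omega)
    simp only [] at hstep
    rw [hstep]
    have := ih (j + 1) (by omega) (by omega) (by omega)
    rw [show ((j : Int) + 1 + 1) = (((j + 1 : Nat) : Int) + 1) by omega]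
    exact this

theorem S_start (cs : List Char) (i : Nat) : pvS cs i i = pvM cs (i + 1) := by
  unfold pvS pvM
  apply List.ext_getElem (by simp)
  intro r h1 h2
  simp only [List.getElem_map, List.getElem_range]
  by_cases hri : r = i
  · subst hri
    rw [if_neg (lt_irrefl r), if_pos rfl, if_pos (by omega)]
    unfold pvRowTo
    apply List.ext_getElem (by simp)
    intro c hc1 hc2
    simp only [List.getElem_map, List.getElem_range, List.getElem_replicate]
    by_cases h : c ≤ r
    · rw [if_pos h, pvG_zero cs r c h]
    · rw [if_neg h]
  · by_cases h : r < i
    · rw [if_pos h, if_pos (by omega)]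
    · rw [if_neg h, if_neg hri, if_neg (by omega)]

theorem S_end (cs : List Char) (i : Nat) (hi : i < cs.length) : pvS cs i (cs.length - 1) = pvM cs i := by
  unfold pvS pvM
  apply List.ext_getElem (by simp)
  intro r h1 h2
  simp only [List.getElem_map, List.getElem_range]
  by_cases hri : r = i
  · subst hri
    rw [if_neg (lt_irrefl r), if_pos rfl, if_neg (lt_irrefl r)]
    unfold pvRowTo pvRow
    apply List.ext_getElem (by simp)
    intro c hc1 hc2
    simp only [List.getElem_map, List.getElem_range]
    simp only [List.length_map, List.length_range] at hc1
    rw [if_pos (by omega)]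
  · by_cases h : r < i
    · rw [if_pos h, if_pos h]
    · rw [if_neg h, if_neg hri, if_neg h]

theorem outer_step (cs : List Char) (i : Nat) (hi : i ≤ cs.length) :
    (fun (m : List (List Int)) (ii : Int) =>
      (PySem.List.pyRange (ii + 1) (cs.length : Int) 1).foldl
        (fun m jj =>
          if ii > jj then pvSet2 m ii jj 0
          else if jj - ii = 1 then
            (if PySem.List.pyGetD cs ii ' ' = '(' ∧ PySem.List.pyGetD cs jj ' ' = ')' then pvSet2 m ii jj 2 else m)
          else
            if PySem.List.pyGetD cs jj ' ' = '(' then pvSet2 m ii jj (pvGet2 m ii (jj - 1))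
            else if PySem.List.pyGetD cs ii ' ' = ')' then pvSet2 m ii jj (pvGet2 m (ii + 1) jj)
            else pvSet2 m ii jj (pvGet2 m (ii + 1) (jj - 1) + 2)) m)
      (pvM cs (i + 1)) (i : Int)
    = pvM cs i := by
  simp only []
  by_cases hin : i < cs.length
  · rw [← S_start cs i]
    rw [show ((i : Int) + 1) = (((i : Nat) : Int) + 1) by omega]
    rw [inner_loop cs i (cs.length - 1 - i) i (le_refl i) hin rfl]
    exact S_end cs i hin
  · rw [PySem.List.pyRange_one_eq_nil (by omega), List.foldl_nil]
    rw [pvM_top cs (i + 1) (by omega), pvM_top cs i (by omega)]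

theorem outer_loop (cs : List Char) :
    ∀ i, i ≤ cs.length →
      (PySem.List.pyRange (i : Int) (-1) (-1)).foldl
        (fun m ii =>
          (PySem.List.pyRange (ii + 1) (cs.length : Int) 1).foldl
            (fun m jj =>
              if ii > jj then pvSet2 m ii jj 0
              else if jj - ii = 1 then
                (if PySem.List.pyGetD cs ii ' ' = '(' ∧ PySem.List.pyGetD cs jj ' ' = ')' then pvSet2 m ii jj 2 else m)
              else
                if PySem.List.pyGetD cs jj ' ' = '(' then pvSet2 m ii jj (pvGet2 m ii (jj - 1))
                else if PySem.List.pyGetD cs ii ' ' = ')' then pvSet2 m ii jj (pvGet2 m (ii + 1) jj)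
                else pvSet2 m ii jj (pvGet2 m (ii + 1) (jj - 1) + 2)) m)
        (pvM cs (i + 1))
      = pvM cs 0 := by
  intro i
  induction i with
  | zero =>
    intro h
    rw [PySem.List.pyRange_neg_one_cons (by omega), List.foldl_cons]
    rw [PySem.List.pyRange_neg_one_eq_nil (by omega), List.foldl_nil]
    have hstep := outer_step cs 0 h
    simp only [] at hstep
    exact_mod_cast hstep
  | succ k ih =>
    intro h
    rw [PySem.List.pyRange_neg_one_cons (by omega), List.foldl_cons]
    have hstep := outer_step cs (k + 1) h
    simp only [] at hstep
    rw [hstep]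
    rw [show (((k + 1 : Nat) : Int) - 1) = ((k : Nat) : Int) by omega]
    exact ih (by omega)

theorem map_eq_pvM (cs : List Char) :
    (List.range cs.length).map (fun i => (List.range cs.length).map (fun j => pvG cs i j)) = pvM cs 0 := by
  unfold pvM pvRow
  simp

def pvGoodCache (cs : List Char) (c : List (List (Option Int))) : Prop :=
  ∀ i j v, pvGetC c i j = some v → v = pvG cs i j

theorem getC_setC (c : List (List (Option Int))) (a b : Nat) (v : Int) (a' b' : Nat) (w : Int)
    (h : pvGetC (pvSetC c a b v) a' b' = some w) :
    (a = a' ∧ b = b' ∧ w = v) ∨ pvGetC c a' b' = some w := by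
  unfold pvGetC pvSetC at h
  unfold pvGetC
  by_cases haa : a = a'
  · subst haa
    by_cases hlen : a < c.length
    · rw [show (c.set a ((c.getD a []).set b (some v))).getD a [] = (c.getD a []).set b (some v) by
        simp [List.getD_eq_getElem?_getD, hlen]] at h
      by_cases hbb : b = b'
      · subst hbb
        by_cases hl2 : b < (c.getD a []).length
        · left
          refine ⟨rfl, rfl, ?_⟩
          have hl2' : b < ((getElem? c a).getD []).length := by
            simpa [List.getD_eq_getElem?_getD] using hl2
          rw [show ((c.getD a []).set b (some v)).getD b none = some v by
            simp [List.getD_eq_getElem?_getD, hl2']] at h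
          injection h with h
          exact h.symm
        · right
          rw [List.set_eq_of_length_le (by omega)] at h
          exact h
      · right
        rw [show ((c.getD a []).set b (some v)).getD b' none = (c.getD a []).getD b' none by
          simp [List.getD_eq_getElem?_getD, hbb]] at h
        exact h
    · rw [List.set_eq_of_length_le (by omega)] at h
      right; exact h
  · right
    rw [show (c.set a ((c.getD a []).set b (some v))).getD a' [] = c.getD a' [] by
      simp [List.getD_eq_getElem?_getD, haa]] at h
    exact h

theorem setC_good (cs : List Char) (c : List (List (Option Int))) (a b : Nat)
    (hg : pvGoodCache cs c) (v : Int) (hval : v = pvG cs a b) :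
    pvGoodCache cs (pvSetC c a b v) := by
  intro i j w hw
  rcases getC_setC c a b v i j w hw with ⟨h1, h2, h3⟩ | h
  · subst h1; subst h2; subst h3; exact hval
  · exact hg i j w h

theorem good_cache0 (cs : List Char) (n : Nat) :
    pvGoodCache cs ((List.range n).map (fun _ => List.replicate n (none : Option Int))) := by
  intro i j v hv
  exfalso
  unfold pvGetC at hv
  by_cases hin : i < n
  · rw [PySem.List.getD_map_range _ _ _ _ hin] at hv
    simp at hv
  · have hrow : ((List.range n).map (fun _ => List.replicate n (none : Option Int))).getD i [] = [] := by
      rw [List.getD_eq_getElem?_getD, List.getElem?_eq_none (by simpa using (by omega : n ≤ i))]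
      rfl
    rw [hrow] at hv
    simp at hv

theorem walk_path (cs : List Char) (cache : List (List (Option Int))) :
    ∀ d i j, j - i = d → ∀ (path : List (Nat × Nat × Int)),
      pvWalk cs cache i j path =
        ((pvWalk cs cache i j []).1, (pvWalk cs cache i j []).2.1,
          path ++ (pvWalk cs cache i j []).2.2) := by
  intro d
  induction d using Nat.strong_induction_on with
  | _ d ih =>
    intro i j hd path
    by_cases hC : j - i > 1 ∧ pvGetC cache i j = none
    · by_cases h1 : cs.getD j ' ' = '('
      · have hw : pvWalk cs cache i j [] = pvWalk cs cache i (j - 1) [(i, j, 0)] := by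
          rw [pvWalk, if_pos hC, if_pos h1, List.nil_append]
        rw [pvWalk, if_pos hC, if_pos h1, hw]
        rw [ih (j - 1 - i) (by omega) i (j - 1) rfl (path ++ [(i, j, 0)])]
        rw [ih (j - 1 - i) (by omega) i (j - 1) rfl [(i, j, 0)]]
        simp
      · by_cases h2 : cs.getD i ' ' = ')'
        · have hw : pvWalk cs cache i j [] = pvWalk cs cache (i + 1) j [(i, j, 0)] := by
            rw [pvWalk, if_pos hC, if_neg h1, if_pos h2, List.nil_append]
          rw [pvWalk, if_pos hC, if_neg h1, if_pos h2, hw]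
          rw [ih (j - (i + 1)) (by omega) (i + 1) j rfl (path ++ [(i, j, 0)])]
          rw [ih (j - (i + 1)) (by omega) (i + 1) j rfl [(i, j, 0)]]
          simp
        · have hw : pvWalk cs cache i j [] = pvWalk cs cache (i + 1) (j - 1) [(i, j, 2)] := by
            rw [pvWalk, if_pos hC, if_neg h1, if_neg h2, List.nil_append]
          rw [pvWalk, if_pos hC, if_neg h1, if_neg h2, hw]
          rw [ih (j - 1 - (i + 1)) (by omega) (i + 1) (j - 1) rfl (path ++ [(i, j, 2)])]
          rw [ih (j - 1 - (i + 1)) (by omega) (i + 1) (j - 1) rfl [(i, j, 2)]]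
          simp
    · have hw : pvWalk cs cache i j [] = (i, j, []) := by rw [pvWalk, if_neg hC]
      rw [pvWalk, if_neg hC, hw]
      simp

theorem cell_step (cs : List Char) (cache : List (List (Option Int))) (i j i' j' : Nat)
    (e : Nat × Nat × Int)
    (hw1 : pvWalk cs cache i j [] = pvWalk cs cache i' j' [e]) :
    pvCell cs cache i j = pvStep (pvCell cs cache i' j') e := by
  unfold pvCell
  rw [hw1, walk_path cs cache (j' - i') i' j' rfl [e]]
  rcases hw : pvWalk cs cache i' j' [] with ⟨a, b, q⟩
  simp only [List.reverse_append, List.reverse_cons, List.reverse_nil, List.nil_append,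
    List.foldl_append, List.foldl_cons, List.foldl_nil]

theorem cell_spec (cs : List Char) :
    ∀ d i j, j - i = d → ∀ cache, pvGoodCache cs cache →
      (pvCell cs cache i j).1 = pvG cs i j ∧ pvGoodCache cs (pvCell cs cache i j).2 := by
  intro d
  induction d using Nat.strong_induction_on with
  | _ d ih =>
    intro i j hd cache hg
    by_cases hC : j - i > 1 ∧ pvGetC cache i j = none
    · have hgt := hC.1
      have hGne : ¬ i ≥ j := by omega
      have hGne1 : ¬ j - i = 1 := by omega
      by_cases h1 : cs.getD j ' ' = '('
      · have hw1 : pvWalk cs cache i j [] = pvWalk cs cache i (j - 1) [(i, j, 0)] := by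
          rw [pvWalk, if_pos hC, if_pos h1, List.nil_append]
        rw [cell_step cs cache i j i (j - 1) (i, j, 0) hw1]
        have IH := ih (j - 1 - i) (by omega) i (j - 1) rfl cache hg
        have hG : pvG cs i j = pvG cs i (j - 1) := by
          rw [pvG, if_neg hGne, if_neg hGne1, if_pos h1]
        unfold pvStep
        refine ⟨?_, ?_⟩
        · simp only []
          rw [IH.1, hG, add_zero]
        · simp only []
          exact setC_good cs _ i j IH.2 _ (by rw [IH.1, hG, add_zero])
      · by_cases h2 : cs.getD i ' ' = ')'
        · have hw1 : pvWalk cs cache i j [] = pvWalk cs cache (i + 1) j [(i, j, 0)] := by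
            rw [pvWalk, if_pos hC, if_neg h1, if_pos h2, List.nil_append]
          rw [cell_step cs cache i j (i + 1) j (i, j, 0) hw1]
          have IH := ih (j - (i + 1)) (by omega) (i + 1) j rfl cache hg
          have hG : pvG cs i j = pvG cs (i + 1) j := by
            rw [pvG, if_neg hGne, if_neg hGne1, if_neg h1, if_pos h2]
          unfold pvStep
          refine ⟨?_, ?_⟩
          · simp only []
            rw [IH.1, hG, add_zero]
          · simp only []
            exact setC_good cs _ i j IH.2 _ (by rw [IH.1, hG, add_zero])
        · have hw1 : pvWalk cs cache i j [] = pvWalk cs cache (i + 1) (j - 1) [(i, j, 2)] := by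
            rw [pvWalk, if_pos hC, if_neg h1, if_neg h2, List.nil_append]
          rw [cell_step cs cache i j (i + 1) (j - 1) (i, j, 2) hw1]
          have IH := ih (j - 1 - (i + 1)) (by omega) (i + 1) (j - 1) rfl cache hg
          have hG : pvG cs i j = pvG cs (i + 1) (j - 1) + 2 := by
            rw [pvG, if_neg hGne, if_neg hGne1, if_neg h1, if_neg h2]
          unfold pvStep
          refine ⟨?_, ?_⟩
          · simp only []
            rw [IH.1, hG]
          · simp only []
            exact setC_good cs _ i j IH.2 _ (by rw [IH.1, hG])
    · have hw : pvWalk cs cache i j [] = (i, j, []) := by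
        rw [pvWalk, if_neg hC]
      unfold pvCell
      rw [hw]
      simp only [List.reverse_nil, List.foldl_nil]
      unfold pvBase
      by_cases hij : i ≥ j
      · rw [if_pos hij]
        exact ⟨(pvG_zero cs i j hij).symm, hg⟩
      · rw [if_neg hij]
        cases hget : pvGetC cache i j with
        | some v =>
          simp only []
          exact ⟨hg i j v hget, hg⟩
        | none =>
          have hj : j = i + 1 := by
            by_cases hgt : j - i > 1
            · exact absurd ⟨hgt, hget⟩ hC
            · omega
          subst hj
          simp only []
          refine ⟨?_, ?_⟩
          · rw [pvG_succ_eq]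
          · exact setC_good cs cache i (i + 1) hg _ (by rw [pvG_succ_eq])

theorem foldl_set_length (f : Nat → Int) :
    ∀ (js : List Nat) (r : List Int), (js.foldl (fun r j => r.set j (f j)) r).length = r.length := by
  intro js
  induction js with
  | nil => intro r; rfl
  | cons x xs ihx => intro r; rw [List.foldl_cons, ihx, List.length_set]

theorem foldl_set_getD (f : Nat → Int) :
    ∀ (js : List Nat) (r : List Int) (c : Nat), c < r.length →
      (js.foldl (fun r j => r.set j (f j)) r).getD c 0 = if c ∈ js then f c else r.getD c 0 := by
  intro js
  induction js with
  | nil => intro r c _; simp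
  | cons x xs ihx =>
    intro r c hc
    rw [List.foldl_cons, ihx (r.set x (f x)) c (by rw [List.length_set]; exact hc)]
    by_cases hmem : c ∈ xs
    · rw [if_pos hmem, if_pos (by simp [hmem])]
    · rw [if_neg hmem]
      by_cases hcx : x = c
      · subst hcx
        rw [if_pos (by simp), show (r.set x (f x)).getD x 0 = f x by
          simp [List.getD_eq_getElem?_getD, hc]]
      · rw [if_neg (by simp [hmem]; omega), show (r.set x (f x)).getD c 0 = r.getD c 0 by
          simp [List.getD_eq_getElem?_getD, hcx]]

theorem row_eq_map (cs : List Char) (i : Nat) :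
    (List.range' (i + 1) (cs.length - (i + 1))).foldl (fun r j => r.set j (pvG cs i j))
        (List.replicate cs.length 0)
      = (List.range cs.length).map (fun j => pvG cs i j) := by
  apply List.ext_getElem (by rw [foldl_set_length]; simp)
  intro c h1 h2
  have hcn : c < cs.length := by simpa using h2
  rw [← List.getD_eq_getElem _ 0 h1, foldl_set_getD (fun j => pvG cs i j) _ _ c (by simpa using hcn)]
  simp only [List.getElem_map, List.getElem_range]
  by_cases hmem : c ∈ List.range' (i + 1) (cs.length - (i + 1))
  · rw [if_pos hmem]
  · rw [if_neg hmem]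
    have hci : c ≤ i := by
      rcases Nat.lt_or_ge c (i + 1) with h | h
      · omega
      · exact absurd (List.mem_range'_1.mpr ⟨h, by omega⟩) hmem
    rw [show (List.replicate cs.length (0 : Int)).getD c 0 = 0 by simp]
    exact (pvG_zero cs i c hci).symm

theorem row_inv (cs : List Char) (i : Nat) :
    ∀ (js : List Nat) (row : List Int) (cache : List (List (Option Int))),
      pvGoodCache cs cache →
      (js.foldl (fun (st2 : List Int × List (List (Option Int))) j =>
            match pvGetC st2.2 i j with
            | some v => (st2.1.set j v, st2.2)
            | none =>
              let (acc, cache) := pvCell cs st2.2 i j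
              (st2.1.set j acc, cache)) (row, cache)).1
          = js.foldl (fun r j => r.set j (pvG cs i j)) row
      ∧ pvGoodCache cs
          (js.foldl (fun (st2 : List Int × List (List (Option Int))) j =>
            match pvGetC st2.2 i j with
            | some v => (st2.1.set j v, st2.2)
            | none =>
              let (acc, cache) := pvCell cs st2.2 i j
              (st2.1.set j acc, cache)) (row, cache)).2 := by
  intro js
  induction js with
  | nil => intro row cache hg; exact ⟨rfl, hg⟩
  | cons x xs ihx =>
    intro row cache hg
    rw [List.foldl_cons, List.foldl_cons]
    cases hget : pvGetC cache i x with
    | some v =>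
      simp only []
      rw [hg i x v hget]
      exact ihx (row.set x (pvG cs i x)) cache hg
    | none =>
      simp only []
      rcases hcell : pvCell cs cache i x with ⟨acc, cache'⟩
      simp only []
      have hspec := cell_spec cs (x - i) i x rfl cache hg
      rw [hcell] at hspec
      obtain ⟨hacc, hgood⟩ := hspec
      simp only [] at hacc hgood
      rw [hacc]
      exact ihx (row.set x (pvG cs i x)) cache' hgood

theorem outer_inv (cs : List Char) :
    ∀ (is : List Nat) (res : List (List Int)) (cache : List (List (Option Int))),
      pvGoodCache cs cache →
      (is.foldl (fun (st : List (List Int) × List (List (Option Int))) i =>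
          let (row, cache) := (List.range' (i + 1) (cs.length - (i + 1))).foldl
            (fun (st2 : List Int × List (List (Option Int))) j =>
              match pvGetC st2.2 i j with
              | some v => (st2.1.set j v, st2.2)
              | none =>
                let (acc, cache) := pvCell cs st2.2 i j
                (st2.1.set j acc, cache))
            (List.replicate cs.length (0 : Int), st.2)
          (st.1 ++ [row], cache)) (res, cache)).1
        = res ++ is.map (fun i => (List.range cs.length).map (fun j => pvG cs i j)) := by
  intro is
  induction is with
  | nil => intro res cache _; simp
  | cons x xs ihx =>
    intro res cache hg
    rw [List.foldl_cons]
    rcases hin : (List.range' (x + 1) (cs.length - (x + 1))).foldl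
        (fun (st2 : List Int × List (List (Option Int))) j =>
          match pvGetC st2.2 x j with
          | some v => (st2.1.set j v, st2.2)
          | none =>
            let (acc, cache) := pvCell cs st2.2 x j
            (st2.1.set j acc, cache))
        (List.replicate cs.length (0 : Int), cache) with ⟨row, cache'⟩
    have hrow := row_inv cs x (List.range' (x + 1) (cs.length - (x + 1)))
      (List.replicate cs.length (0 : Int)) cache hg
    rw [hin] at hrow
    obtain ⟨hrow1, hrow2⟩ := hrow
    simp only [] at hrow1 hrow2
    simp only []
    rw [ihx (res ++ [row]) cache' hrow2]
    rw [hrow1, row_eq_map cs x]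
    simp

theorem alt_eq_map (cadena : String) :
    buscarOptimos_alt cadena
      = (List.range cadena.toList.length).map
          (fun i => (List.range cadena.toList.length).map (fun j => pvG cadena.toList i j)) := by
  unfold buscarOptimos_alt
  simp only []
  rcases hfold : (List.range cadena.toList.length).foldl
      (fun (st : List (List Int) × List (List (Option Int))) i =>
        let (row, cache) := (List.range' (i + 1) (cadena.toList.length - (i + 1))).foldl
          (fun (st2 : List Int × List (List (Option Int))) j =>
            match pvGetC st2.2 i j with
            | some v => (st2.1.set j v, st2.2)
            | none =>
              let (acc, cache) := pvCell cadena.toList st2.2 i j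
              (st2.1.set j acc, cache))
          (List.replicate cadena.toList.length (0 : Int), st.2)
        (st.1 ++ [row], cache))
      ([], (List.range cadena.toList.length).map (fun _ => List.replicate cadena.toList.length (none : Option Int)))
    with ⟨res, cfin⟩
  have h := outer_inv cadena.toList (List.range cadena.toList.length) []
    ((List.range cadena.toList.length).map (fun _ => List.replicate cadena.toList.length (none : Option Int)))
    (good_cache0 cadena.toList cadena.toList.length)
  rw [hfold] at h
  simpa using h

theorem main_eq (cadena : String) : buscarOptimos cadena = buscarOptimos_alt cadena := by
  rw [alt_eq_map]
  unfold buscarOptimos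
  simp only []
  rw [init_eq cadena.toList]
  rw [show pvM cadena.toList cadena.toList.length = pvM cadena.toList (cadena.toList.length + 1) by
    rw [pvM_top _ _ le_rfl, pvM_top _ _ (by omega)]]
  rw [outer_loop cadena.toList cadena.toList.length le_rfl]
  exact (map_eq_pvM cadena.toList).symm

-- ===== VERDICT (by name: the statement is the Claim_ definition above) =====
theorem buscarOptimos_spec : Claim_equal_buscarOptimos := by
  intro cadena _
  unfold Spec_buscarOptimos
  exact main_eq cadena
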